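-- pv_equiv track=rewrite | github.com/diegossena/py-utils | utils/number.py | getNoFibonacciNumber
-- ===== SOURCE A (Python) =====
-- class FibbonacciCounter:
--   def __init__(self):
--     self.previous = 0
--     self.current = 1
--
--   def next(self):
--     res = self.previous
--     aux = self.current
--     self.current = self.previous + self.current
--     self.previous = aux
--     return res
--
-- def getNoFibonacciNumber(index: int):
--   fibbonacciCounter = FibbonacciCounter()
--
--   current = fibbonacciCounter.next()
--   previous = 0
--
--   i = 0
--
--   while True:
--     previous += 1
--     while previous < current:
--       i += 1
--       if i == index:
--         return previous
--       previous += 1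
--     previous = current
--     current = fibbonacciCounter.next()
-- ===== SOURCE B (Python) =====
-- def getNoFibonacciNumber(index: int):
--     # walk consecutive Fibonacci pairs; each gap (a, b) contains b - a - 1
--     # non-Fibonacci integers, so jump gap-by-gap instead of counting one by one
--     a, b = 2, 3
--     count = 0
--     while True:
--         gap = b - a - 1
--         if index <= count + gap:
--             return a + (index - count)
--         count += gap
--         a, b = b, a + b
-- ===== Notes on version B (the rewrite author's own statement) =====
-- stated objective: faster
-- what changed: B walks consecutive Fibonacci pairs and jumps over each gap arithmetically (answer = a + (index - count) once the cumulative gap count reaches index) instead of A's scan that increments through every integer one by one; Pre_ excludes index <= 0, where A's while-True loop never returns (diverges).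
-- outside the precondition, e.g. on getNoFibonacciNumber(0): A does not finish within the time limit, B returns 2
import Mathlib
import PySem

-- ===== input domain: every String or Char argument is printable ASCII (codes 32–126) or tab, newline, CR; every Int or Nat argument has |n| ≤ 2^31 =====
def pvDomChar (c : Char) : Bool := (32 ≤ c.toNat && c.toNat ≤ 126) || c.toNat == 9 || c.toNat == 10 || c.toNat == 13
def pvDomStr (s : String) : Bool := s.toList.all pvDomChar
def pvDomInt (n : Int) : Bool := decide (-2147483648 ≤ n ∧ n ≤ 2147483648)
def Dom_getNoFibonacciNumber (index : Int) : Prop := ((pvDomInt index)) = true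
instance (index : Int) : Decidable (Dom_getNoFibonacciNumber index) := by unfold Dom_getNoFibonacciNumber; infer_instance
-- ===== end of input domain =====

-- B replaces A's one-by-one scan of the integers with a gap-by-gap jump over
-- consecutive Fibonacci pairs (O(log index) instead of O(answer)).

-- ===== PORT A =====
-- FibbonacciCounter.next: returns previous, advances (previous, current)
def pyCounterNext (p c : Int) : Int × Int × Int := (p, c, p + c)

-- inner `while previous < current` loop; .inl = returned answer, .inr = final i
def innerA (index : Int) (prev cur i : Int) : Int ⊕ Int :=
  if prev < cur then
    if i + 1 = index then Sum.inl prev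
    else innerA index (prev + 1) cur (i + 1)
  else Sum.inr i
termination_by (cur - prev).toNat
decreasing_by omega

-- outer `while True` loop; fuel only makes the loop total (enough for every index ≥ 1)
def outerA (index : Int) : Nat → Int → Int → Int → Int → Int → Int
  | 0, _, _, _, _, _ => 0
  | fuel+1, prev, cur, i, p, c =>
    match innerA index (prev + 1) cur i with
    | Sum.inl ans => ans
    | Sum.inr i' =>
      let r := pyCounterNext p c
      outerA index fuel cur r.1 i' r.2.1 r.2.2

def getNoFibonacciNumber (index : Int) : Int :=
  -- counter starts (0,1); current := next() = 0 leaving counter (1,1); previous = 0; i = 0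
  outerA index (index.toNat + 7) 0 0 0 1 1

-- ===== PORT B =====
-- Source B's `while True` loop over consecutive Fibonacci pairs; fuel only makes it total
def loopB (index : Int) : Nat → Int → Int → Int → Int
  | 0, _, _, _ => 0
  | fuel+1, a, b, count =>
    let gap := b - a - 1
    if index ≤ count + gap then a + (index - count)
    else loopB index fuel b (a + b) (count + gap)

def getNoFibonacciNumber_alt (index : Int) : Int :=
  loopB index (index.toNat + 3) 2 3 0

-- ===== PRECONDITION & SPEC =====
-- Pre_ excludes index ≤ 0, where A's `while True` loop never returns (it diverges).
def Pre_getNoFibonacciNumber (index : Int) : Prop := 1 ≤ index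
instance (index : Int) : Decidable (Pre_getNoFibonacciNumber index) := by unfold Pre_getNoFibonacciNumber; infer_instance
def pvWitness_getNoFibonacciNumber : Int := 5

def Spec_getNoFibonacciNumber (index : Int) (out : Int) : Prop := out = getNoFibonacciNumber_alt index
instance (index : Int) (out : Int) : Decidable (Spec_getNoFibonacciNumber index out) := by unfold Spec_getNoFibonacciNumber; infer_instance

-- ===== CLAIM (what is proved, stated in full; the proofs are below) =====
def Claim_equal_getNoFibonacciNumber : Prop := ∀ (index : Int), Dom_getNoFibonacciNumber index → Pre_getNoFibonacciNumber index → Spec_getNoFibonacciNumber index (getNoFibonacciNumber index)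

-- ===== LEMMAS AND PROOFS =====

-- closed form of the inner scan
lemma innerA_eq (index prev cur i : Int) :
    innerA index prev cur i =
      if i < index ∧ index ≤ i + (cur - prev) then Sum.inl (prev + (index - i) - 1)
      else Sum.inr (i + max (cur - prev) 0) := by
  fun_induction innerA index prev cur i with
  | case1 prev cur i hi =>
    split_ifs with hc
    · simp only [Sum.inl.injEq]; omega
    · omega
  | case2 prev cur i hi ih =>
    rw [ih]
    split_ifs with h1 h2 h2
    · simp only [Sum.inl.injEq]; omega
    · omega
    · omega
    · simp only [Sum.inr.injEq]; omega
  | case3 prev cur i =>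
    split_ifs with hc
    · omega
    · simp only [Sum.inr.injEq]; omega

-- both loops walk the same Fibonacci pairs (a, b) with the same running count
lemma outerA_eq_loopB (index : Int) : ∀ (fuel : Nat) (a b cnt : Int),
    2 ≤ a → a < b → cnt < index →
    (index - cnt).toNat + (if b = a + 1 then 2 else 1) ≤ fuel →
    outerA index fuel a b cnt (a + b) (a + 2*b) = loopB index fuel a b cnt := by
  intro fuel
  induction fuel with
  | zero => intro a b cnt _ _ hcnt hfuel; split_ifs at hfuel <;> omega
  | succ f ih =>
    intro a b cnt ha hab hcnt hfuel
    show (match innerA index (a + 1) b cnt with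
          | Sum.inl ans => ans
          | Sum.inr i' => outerA index f b (a+b) i' (a+2*b) ((a+b) + (a+2*b))) = _
    rw [innerA_eq]
    by_cases hin : index ≤ cnt + (b - (a + 1))
    · rw [if_pos ⟨hcnt, by omega⟩]
      show (a + 1 + (index - cnt) - 1 : Int) = loopB index (f+1) a b cnt
      conv_rhs => rw [loopB]
      rw [if_pos (by omega)]
      omega
    · rw [if_neg (by omega)]
      show outerA index f b (a+b) (cnt + max (b - (a+1)) 0) (a+2*b) ((a+b) + (a+2*b)) = _
      have hmax : cnt + max (b - (a+1)) 0 = cnt + (b - a - 1) := by omega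
      have h1 : a + 2*b = b + (a + b) := by ring
      have h2 : (a+b) + (a+2*b) = b + 2*(a + b) := by ring
      rw [hmax, h2, h1, ih b (a+b) (cnt + (b - a - 1)) (by omega) (by omega) (by omega)
        (by split_ifs at hfuel ⊢ <;> omega)]
      conv_rhs => rw [loopB]
      rw [if_neg (by omega)]

-- ===== VERDICT (by name: the statement is the Claim_ definition above) =====
theorem getNoFibonacciNumber_spec : Claim_equal_getNoFibonacciNumber := by
  intro index _ hpre
  unfold Spec_getNoFibonacciNumber getNoFibonacciNumber getNoFibonacciNumber_alt
  have hpre' : 1 ≤ index := hpre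
  -- unroll the first four outer iterations of A (all with empty inner scans)
  show outerA index (index.toNat + 6 + 1) 0 0 0 1 1 = _
  rw [outerA, innerA_eq, if_neg (by omega)]
  show outerA index (index.toNat + 5 + 1) 0 1 _ 1 2 = _
  rw [outerA, innerA_eq, if_neg (by omega)]
  show outerA index (index.toNat + 4 + 1) 1 1 _ 2 3 = _
  rw [outerA, innerA_eq, if_neg (by omega)]
  show outerA index (index.toNat + 3 + 1) 1 2 _ 3 5 = _
  rw [outerA, innerA_eq, if_neg (by omega)]
  show outerA index (index.toNat + 3) 2 3 (0 + max (2 - (1+1)) 0 + max 0 0 + max 0 0 + max (2 - (1+1)) 0) 5 8 = _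
  have : (0 + max (2 - (1+1)) 0 + max 0 0 + max 0 0 + max (2 - (1+1)) 0 : Int) = 0 := by omega
  rw [this, show (5:Int) = 2 + 3 from rfl, show (8:Int) = 2 + 2*3 from rfl,
    outerA_eq_loopB index (index.toNat + 3) 2 3 0 (by omega) (by omega) (by omega) (by norm_num)]
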